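-- pv_equiv track=rewrite | github.com/RunjeethNikam/Leetcode | count-pairs-of-connectable-servers-in-a-weighted-tree-network.py | countPairsOfConnectableServers
-- ===== SOURCE A (Python) =====
-- from typing import List
-- from collections import defaultdict
--
-- def countPairsOfConnectableServers(edges: List[List[int]], signalSpeed: int) -> List[int]:
--     g = defaultdict(list)
--     for a, b, w in edges:
--         g[a].append([b, w])
--         g[b].append([a, w])
--
--     def dfs(node, w, visited):
--         count = 0
--         if w % signalSpeed:
--             count += 1
--
--         for adj_node, adj_w in g[node]:
--             if adj_node not in visited:
--                 visited.add(adj_node)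
--                 count += dfs(adj_node, w + adj_w, visited)
--
--         return count
--
--     result = []
--
--     for node_to_be_processed in sorted(g.keys()):
--         if len(g[node_to_be_processed]) > 1:
--             nodes = []
--             for adj_node, w in g[node_to_be_processed]:
--                 visited = set([adj_node, node_to_be_processed])
--                 nodes.append(dfs(adj_node, w, visited))
--             S = sum(nodes)
--             temp = 0
--             for node in nodes:
--                 S -= node
--                 temp += (node * S)
--             result.append(temp)
--     return result
-- ===== SOURCE B (Python) =====
-- from typing import List
-- from collections import defaultdict
--
-- def countPairsOfConnectableServers(edges: List[List[int]], signalSpeed: int) -> List[int]: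
--     g = defaultdict(list)
--     for a, b, w in edges:
--         g[a].append((b, w))
--         g[b].append((a, w))
--
--     result = []
--     for center in sorted(g):
--         adj = g[center]
--         if len(adj) <= 1:
--             continue
--         counts = []
--         for start, w0 in adj:
--             cnt = 1 if w0 % signalSpeed else 0
--             visited = {start, center}
--             stack = [(a, w0 + aw) for a, aw in reversed(g[start])]
--             while stack:
--                 n, d = stack.pop()
--                 if n in visited:
--                     continue
--                 visited.add(n)
--                 if d % signalSpeed:
--                     cnt += 1
--                 stack.extend((a, d + aw) for a, aw in reversed(g[n]))
--             counts.append(cnt)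
--         S = sum(counts)
--         result.append((S * S - sum(c * c for c in counts)) // 2)
--     return result
-- ===== Notes on version B (the rewrite author's own statement) =====
-- stated objective: alternative
-- what changed: The recursive per-branch DFS with a shared mutated visited set is replaced by an explicit check-at-pop stack machine, and A's running suffix-sum pairing loop over the branch counts is replaced by the closed form (S*S - sum(c*c))//2.
-- outside the precondition, e.g. on countPairsOfConnectableServers([[1, 2, 3]], 0): A returns [], B returns []
import Mathlib
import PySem

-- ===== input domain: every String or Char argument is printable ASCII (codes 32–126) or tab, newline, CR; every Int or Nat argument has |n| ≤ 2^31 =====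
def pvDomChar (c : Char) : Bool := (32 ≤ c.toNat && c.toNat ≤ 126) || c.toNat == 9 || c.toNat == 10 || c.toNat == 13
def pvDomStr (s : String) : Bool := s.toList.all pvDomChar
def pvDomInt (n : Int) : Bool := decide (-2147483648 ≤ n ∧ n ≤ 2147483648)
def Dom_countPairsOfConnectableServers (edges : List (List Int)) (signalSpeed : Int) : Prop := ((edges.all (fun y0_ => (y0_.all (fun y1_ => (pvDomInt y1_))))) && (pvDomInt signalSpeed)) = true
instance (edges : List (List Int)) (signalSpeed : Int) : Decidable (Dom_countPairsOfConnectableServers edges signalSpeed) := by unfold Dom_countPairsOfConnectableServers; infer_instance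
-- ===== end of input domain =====

-- B replaces the recursive per-branch DFS by an explicit stack machine and the running
-- suffix-sum pairing loop by the closed form (S*S - Σ c*c) // 2 (objective: alternative).

-- ===== PORT A =====
def pvAdjAddA (g : PySem.Dict Int (List (Int × Int))) (k : Int) (p : Int × Int) :
    PySem.Dict Int (List (Int × Int)) :=
  g.insert k (g.getD k [] ++ [p])

def pvBuildA (edges : List (List Int)) : PySem.Dict Int (List (Int × Int)) :=
  edges.foldl (fun g e =>
    match e with
    | [a, b, w] => pvAdjAddA (pvAdjAddA g a (b, w)) b (a, w)
    | _ => g) PySem.Dict.empty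

-- A's recursive dfs; the mutated shared `visited` set is threaded as the second component.
-- The fuel 2*|edges|+2 strictly exceeds any possible recursion depth (each nested call
-- has just marked a fresh graph node), so the 0-fuel branch is never reached.
def pvDfsA (g : PySem.Dict Int (List (Int × Int))) (ss : Int) :
    Nat → Int → Int → PySem.Set Int → Int × PySem.Set Int
  | 0, _, _, v => (0, v)
  | fuel+1, node, w, v =>
    (g.getD node []).foldl
      (fun p aw =>
        if aw.1 ∈ p.2 then p
        else
          let r := pvDfsA g ss fuel aw.1 (w + aw.2) (PySem.Set.add p.2 aw.1)
          (p.1 + r.1, r.2))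
      ((if PySem.Int.mod w ss ≠ 0 then (1 : Int) else 0), v)

def countPairsOfConnectableServers (edges : List (List Int)) (signalSpeed : Int) : List Int :=
  let g := pvBuildA edges
  (PySem.List.sorted g.keys (fun x => x) false).foldl
    (fun result center =>
      if 1 < (g.getD center []).length then
        let nodes := (g.getD center []).foldl
          (fun nodes aw =>
            nodes ++ [(pvDfsA g signalSpeed (2 * edges.length + 2) aw.1 aw.2
                        (PySem.Set.ofList [aw.1, center])).1]) []
        let S := nodes.sum
        let st := nodes.foldl (fun st c => (st.1 - c, st.2 + c * (st.1 - c))) (S, (0 : Int))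
        result ++ [st.2]
      else result) []

-- ===== PORT B =====
-- (B builds the same adjacency dict as A; the shared builder pvBuildA is reused.)
-- Termination gas for the stack loop: each iteration pops one entry; marking a fresh
-- node pays for the neighbours it pushes.
def pvStackGas (g : PySem.Dict Int (List (Int × Int))) (v : PySem.Set Int)
    (stack : List (Int × Int)) : Nat :=
  stack.length +
    2 * ((g.keys.filter (fun k => !(decide (k ∈ v)))).map
          (fun k => (g.getD k []).length + 1)).sum

theorem pvFilterSumDrop (F : Int → Nat)
    (v : PySem.Set Int) (n : Int) (hn : n ∉ v) :
    ∀ L : List Int,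
      ((L.filter (fun k => !(decide (k ∈ PySem.Set.add v n)))).map F).sum
        + (if n ∈ L then F n else 0)
      ≤ ((L.filter (fun k => !(decide (k ∈ v)))).map F).sum := by
  intro L
  induction L with
  | nil => simp
  | cons x L ih =>
    have hsplit : ((L.filter (fun k => !(decide (k ∈ PySem.Set.add v n)))).map F).sum
        ≤ ((L.filter (fun k => !(decide (k ∈ v)))).map F).sum :=
      Nat.le_trans (Nat.le_add_right _ _) ih
    rw [List.filter_cons, List.filter_cons]
    by_cases hx : x = n
    · subst hx
      have h1 : (!(decide (x ∈ PySem.Set.add v x))) = false := by simp [PySem.Set.mem_add]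
      have h2 : (!(decide (x ∈ v))) = true := by simpa using hn
      have hmemx : (if x ∈ x :: L then F x else 0) = F x := if_pos (by simp)
      simp only [h1, h2, Bool.false_eq_true, if_false, if_true, List.map_cons,
        List.sum_cons, hmemx]
      omega
    · have hmm : (x ∈ PySem.Set.add v n) ↔ (x ∈ v) := by simp [PySem.Set.mem_add, hx]
      have hin : (if n ∈ x :: L then F n else 0) = (if n ∈ L then F n else 0) := by
        have hiff : (n ∈ x :: L) ↔ (n ∈ L) := by
          simp only [List.mem_cons]
          constructor
          · rintro (h' | h')
            · exact absurd h'.symm hx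
            · exact h'
          · exact Or.inr
        rw [if_congr hiff rfl rfl]
      rw [hin]
      by_cases hv : x ∈ v
      · have h1 : (!(decide (x ∈ PySem.Set.add v n))) = false := by simp [hmm, hv]
        have h2 : (!(decide (x ∈ v))) = false := by simp [hv]
        simp only [h1, h2, Bool.false_eq_true, if_false]
        exact ih
      · have h1 : (!(decide (x ∈ PySem.Set.add v n))) = true := by simp [hmm, hv]
        have h2 : (!(decide (x ∈ v))) = true := by simp [hv]
        simp only [h1, h2, if_true, List.map_cons, List.sum_cons]
        omega

def pvStackB (g : PySem.Dict Int (List (Int × Int))) (ss : Int)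
    (stack : List (Int × Int)) (v : PySem.Set Int) (cnt : Int) : Int :=
  -- Python pops from the list's end and extends with reversed adjacency; here the head
  -- of the list is the stack top, so the two reversals cancel.
  match stack with
  | [] => cnt
  | (n, d) :: rest =>
    if n ∈ v then pvStackB g ss rest v cnt
    else
      pvStackB g ss ((g.getD n []).map (fun aw => (aw.1, d + aw.2)) ++ rest)
        (PySem.Set.add v n) (cnt + (if PySem.Int.mod d ss ≠ 0 then 1 else 0))
termination_by pvStackGas g v stack
decreasing_by
  · simp [pvStackGas]
  · rename_i hmem
    have key := pvFilterSumDrop (fun k => (g.getD k []).length + 1) v n hmem g.keys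
    by_cases hk : n ∈ g.keys
    · simp only [hk, if_pos] at key
      simp only [pvStackGas, List.length_append, List.length_map, List.length_cons]
      omega
    · have hc : g.contains n = false := by
        cases hcc : g.contains n with
        | false => rfl
        | true => exact absurd ((PySem.Dict.contains_iff_mem_keys g n).mp hcc) hk
      have hdeg : g.getD n [] = [] := PySem.Dict.getD_of_not_contains g [] hc
      simp only [hk, if_false] at key
      simp only [pvStackGas, hdeg, List.map_nil, List.nil_append, List.length_cons]
      omega

def countPairsOfConnectableServers_alt (edges : List (List Int)) (signalSpeed : Int) : List Int :=
  let g := pvBuildA edges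
  (PySem.List.sorted g.keys (fun x => x) false).foldl
    (fun result center =>
      let adj := g.getD center []
      if adj.length ≤ 1 then result
      else
        let counts := adj.foldl (fun acc aw =>
          acc ++ [pvStackB g signalSpeed
                    ((g.getD aw.1 []).map (fun bw => (bw.1, aw.2 + bw.2)))
                    (PySem.Set.ofList [aw.1, center])
                    (if PySem.Int.mod aw.2 signalSpeed ≠ 0 then 1 else 0)]) []
        let S := counts.sum
        result ++ [PySem.Int.floordiv (S * S - (counts.map (fun c => c * c)).sum) 2]) []

-- ===== PRECONDITION & SPEC =====
-- Pre_ excludes the inputs where Python A raises: edge rows that are not 3-lists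
-- (ValueError unpacking `for a, b, w in edges`) and signalSpeed = 0 (ZeroDivisionError
-- in `w % signalSpeed`; when no center has degree > 1 no modulus runs and A returns []
-- even for signalSpeed = 0, so Pre_ is marginally narrower there — both programs
-- return [] on such inputs anyway).
def Pre_countPairsOfConnectableServers (edges : List (List Int)) (signalSpeed : Int) : Prop :=
  signalSpeed ≠ 0 ∧ ∀ e ∈ edges, e.length = 3
instance (edges : List (List Int)) (signalSpeed : Int) : Decidable (Pre_countPairsOfConnectableServers edges signalSpeed) := by unfold Pre_countPairsOfConnectableServers; infer_instance

def pvWitness_countPairsOfConnectableServers : List (List Int) × Int :=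
  ([[0, 1, 1], [1, 2, 5], [2, 3, 13], [3, 4, 9], [4, 5, 2]], 1)

def Spec_countPairsOfConnectableServers (edges : List (List Int)) (signalSpeed : Int) (out : List Int) : Prop := out = countPairsOfConnectableServers_alt edges signalSpeed
instance (edges : List (List Int)) (signalSpeed : Int) (out : List Int) : Decidable (Spec_countPairsOfConnectableServers edges signalSpeed out) := by unfold Spec_countPairsOfConnectableServers; infer_instance

-- ===== CLAIM (what is proved, stated in full; the proofs are below) =====
def Claim_equal_countPairsOfConnectableServers : Prop := ∀ (edges : List (List Int)) (signalSpeed : Int), Dom_countPairsOfConnectableServers edges signalSpeed → Pre_countPairsOfConnectableServers edges signalSpeed → Spec_countPairsOfConnectableServers edges signalSpeed (countPairsOfConnectableServers edges signalSpeed)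

-- ===== LEMMAS AND PROOFS =====

-- Every adjacency target of a built graph is itself a key.
def pvClosed (g : PySem.Dict Int (List (Int × Int))) : Prop :=
  ∀ n : Int, ∀ p ∈ g.getD n ([] : List (Int × Int)), p.1 ∈ g.keys

-- Number of keys not yet visited: the fuel yardstick.
def pvMK (g : PySem.Dict Int (List (Int × Int))) (v : PySem.Set Int) : Nat :=
  (g.keys.filter (fun k => !(decide (k ∈ v)))).length

-- The adjacency-fold step of A's dfs, named for the proofs.
def pvStep (g : PySem.Dict Int (List (Int × Int))) (ss : Int) (fuel : Nat) (w : Int) :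
    (Int × PySem.Set Int) → (Int × Int) → (Int × PySem.Set Int) :=
  fun p aw =>
    if aw.1 ∈ p.2 then p
    else
      let r := pvDfsA g ss fuel aw.1 (w + aw.2) (PySem.Set.add p.2 aw.1)
      (p.1 + r.1, r.2)

theorem pvDfsA_succ (g : PySem.Dict Int (List (Int × Int))) (ss : Int) (fuel : Nat)
    (node w : Int) (v : PySem.Set Int) :
    pvDfsA g ss (fuel + 1) node w v
      = (g.getD node []).foldl (pvStep g ss fuel w)
          ((if PySem.Int.mod w ss ≠ 0 then (1 : Int) else 0), v) := rfl

-- Sequential interpreter: run A's dfs over a worklist of (node, distance) pairs.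
def pvRunA (g : PySem.Dict Int (List (Int × Int))) (ss : Int) (fuel : Nat) :
    List (Int × Int) → PySem.Set Int → Int → Int × PySem.Set Int
  | [], v, c => (c, v)
  | (n, d) :: rest, v, c =>
    if n ∈ v then pvRunA g ss fuel rest v c
    else
      let r := pvDfsA g ss fuel n d (PySem.Set.add v n)
      pvRunA g ss fuel rest r.2 (c + r.1)

theorem pvMapConstOneSum : ∀ L : List Int, (L.map (fun _ => (1 : Nat))).sum = L.length := by
  intro L; induction L with
  | nil => rfl
  | cons x L ih => simp [Nat.add_comm]

theorem pvMK_le_keys (g : PySem.Dict Int (List (Int × Int))) (v : PySem.Set Int) :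
    pvMK g v ≤ g.keys.length := by
  simp only [pvMK]
  exact List.length_filter_le _ _

theorem pvMK_anti (g : PySem.Dict Int (List (Int × Int))) (v v' : PySem.Set Int)
    (h : ∀ x, x ∈ v → x ∈ v') : pvMK g v' ≤ pvMK g v := by
  simp only [pvMK]
  apply List.Sublist.length_le
  apply List.monotone_filter_right
  intro a ha
  simp only [Bool.not_eq_eq_eq_not, Bool.not_true, decide_eq_false_iff_not] at ha ⊢
  exact fun hv => ha (h a hv)

theorem pvMK_add_le (g : PySem.Dict Int (List (Int × Int))) (v : PySem.Set Int) (n : Int) :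
    pvMK g (PySem.Set.add v n) ≤ pvMK g v := by
  apply pvMK_anti
  intro x hx
  rw [PySem.Set.mem_add]; exact Or.inl hx

theorem pvMK_add_lt (g : PySem.Dict Int (List (Int × Int))) (v : PySem.Set Int) (n : Int)
    (hk : n ∈ g.keys) (hv : n ∉ v) : pvMK g (PySem.Set.add v n) < pvMK g v := by
  have key := pvFilterSumDrop (fun _ => 1) v n hv g.keys
  rw [if_pos hk, pvMapConstOneSum, pvMapConstOneSum] at key
  simp only [pvMK]
  omega

-- dfs only grows the visited set.
theorem pvDfsA_grow (g : PySem.Dict Int (List (Int × Int))) (ss : Int) :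
    ∀ (fuel : Nat) (n w : Int) (v : PySem.Set Int) (x : Int),
      x ∈ v → x ∈ (pvDfsA g ss fuel n w v).2 := by
  intro fuel
  induction fuel with
  | zero => intro n w v x hx; simpa [pvDfsA] using hx
  | succ f ih =>
    intro n w v x hx
    rw [pvDfsA_succ]
    have hfold : ∀ (l : List (Int × Int)) (c : Int) (vv : PySem.Set Int),
        x ∈ vv → x ∈ (l.foldl (pvStep g ss f w) (c, vv)).2 := by
      intro l
      induction l with
      | nil => intro c vv hvv; exact hvv
      | cons aw l ihl =>
        intro c vv hvv
        rw [List.foldl_cons]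
        by_cases hmem : aw.1 ∈ vv
        · rw [show pvStep g ss f w (c, vv) aw = (c, vv) from by
            simp [pvStep, hmem]]
          exact ihl c vv hvv
        · rw [show pvStep g ss f w (c, vv) aw
              = (c + (pvDfsA g ss f aw.1 (w + aw.2) (PySem.Set.add vv aw.1)).1,
                 (pvDfsA g ss f aw.1 (w + aw.2) (PySem.Set.add vv aw.1)).2) from by
            simp [pvStep, hmem]]
          exact ihl _ _ (ih aw.1 (w + aw.2) (PySem.Set.add vv aw.1) x
            (by rw [PySem.Set.mem_add]; exact Or.inl hvv))
    exact hfold _ _ _ hx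

-- dfs is fuel-insensitive once the fuel exceeds the number of unvisited keys.
theorem pvDfsA_mono (g : PySem.Dict Int (List (Int × Int))) (ss : Int) (hg : pvClosed g) :
    ∀ (m : Nat) (v : PySem.Set Int), pvMK g v ≤ m →
      ∀ (n w : Int) (f1 f2 : Nat), pvMK g v + 1 ≤ f1 → pvMK g v + 1 ≤ f2 →
        pvDfsA g ss f1 n w v = pvDfsA g ss f2 n w v := by
  intro m
  induction m using Nat.strong_induction_on with
  | _ m ih =>
    intro v hm n w f1 f2 h1 h2
    obtain ⟨a, rfl⟩ : ∃ a, f1 = a + 1 := ⟨f1 - 1, by omega⟩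
    obtain ⟨b, rfl⟩ : ∃ b, f2 = b + 1 := ⟨f2 - 1, by omega⟩
    rw [pvDfsA_succ, pvDfsA_succ]
    have hsub : ∀ (l : List (Int × Int)), (∀ p ∈ l, p.1 ∈ g.keys) →
        ∀ (c : Int) (vv : PySem.Set Int), (∀ x, x ∈ v → x ∈ vv) →
          l.foldl (pvStep g ss a w) (c, vv) = l.foldl (pvStep g ss b w) (c, vv) := by
      intro l
      induction l with
      | nil => intro _ c vv _; rfl
      | cons aw l ihl =>
        intro hcl c vv hvv
        have hK : pvMK g vv ≤ pvMK g v := pvMK_anti g v vv hvv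
        rw [List.foldl_cons, List.foldl_cons]
        by_cases hmem : aw.1 ∈ vv
        · rw [show pvStep g ss a w (c, vv) aw = (c, vv) from by simp [pvStep, hmem],
              show pvStep g ss b w (c, vv) aw = (c, vv) from by simp [pvStep, hmem]]
          exact ihl (fun p hp => hcl p (List.mem_cons_of_mem _ hp)) c vv hvv
        · have hkey : aw.1 ∈ g.keys := hcl aw (List.mem_cons_self)
          have hlt : pvMK g (PySem.Set.add vv aw.1) < pvMK g vv :=
            pvMK_add_lt g vv aw.1 hkey hmem
          have hreq : pvDfsA g ss a aw.1 (w + aw.2) (PySem.Set.add vv aw.1)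
              = pvDfsA g ss b aw.1 (w + aw.2) (PySem.Set.add vv aw.1) :=
            ih (pvMK g (PySem.Set.add vv aw.1)) (by omega)
              (PySem.Set.add vv aw.1) le_rfl aw.1 (w + aw.2) a b (by omega) (by omega)
          rw [show pvStep g ss a w (c, vv) aw
              = (c + (pvDfsA g ss b aw.1 (w + aw.2) (PySem.Set.add vv aw.1)).1,
                 (pvDfsA g ss b aw.1 (w + aw.2) (PySem.Set.add vv aw.1)).2) from by
            simp only [pvStep, if_neg hmem]; rw [hreq],
              show pvStep g ss b w (c, vv) aw
              = (c + (pvDfsA g ss b aw.1 (w + aw.2) (PySem.Set.add vv aw.1)).1,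
                 (pvDfsA g ss b aw.1 (w + aw.2) (PySem.Set.add vv aw.1)).2) from by
            simp only [pvStep, if_neg hmem]]
          apply ihl (fun p hp => hcl p (List.mem_cons_of_mem _ hp))
          intro x hx
          exact pvDfsA_grow g ss b aw.1 (w + aw.2) (PySem.Set.add vv aw.1) x
            (by rw [PySem.Set.mem_add]; exact Or.inl (hvv x hx))
    exact hsub _ (hg n) _ _ (fun x hx => hx)

-- the adjacency fold is fuel-insensitive as well
theorem pvFold_mono (g : PySem.Dict Int (List (Int × Int))) (ss : Int) (hg : pvClosed g)
    (w : Int) :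
    ∀ (l : List (Int × Int)), (∀ p ∈ l, p.1 ∈ g.keys) →
      ∀ (c : Int) (vv : PySem.Set Int) (f1 f2 : Nat),
        pvMK g vv + 1 ≤ f1 → pvMK g vv + 1 ≤ f2 →
        l.foldl (pvStep g ss f1 w) (c, vv) = l.foldl (pvStep g ss f2 w) (c, vv) := by
  intro l
  induction l with
  | nil => intro _ c vv f1 f2 _ _; rfl
  | cons aw l ihl =>
    intro hcl c vv f1 f2 h1 h2
    rw [List.foldl_cons, List.foldl_cons]
    by_cases hmem : aw.1 ∈ vv
    · rw [show pvStep g ss f1 w (c, vv) aw = (c, vv) from by simp [pvStep, hmem],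
          show pvStep g ss f2 w (c, vv) aw = (c, vv) from by simp [pvStep, hmem]]
      exact ihl (fun p hp => hcl p (List.mem_cons_of_mem _ hp)) c vv f1 f2 h1 h2
    · have hkey : aw.1 ∈ g.keys := hcl aw (List.mem_cons_self)
      have hlt : pvMK g (PySem.Set.add vv aw.1) < pvMK g vv :=
        pvMK_add_lt g vv aw.1 hkey hmem
      have hreq : pvDfsA g ss f1 aw.1 (w + aw.2) (PySem.Set.add vv aw.1)
          = pvDfsA g ss f2 aw.1 (w + aw.2) (PySem.Set.add vv aw.1) :=
        pvDfsA_mono g ss hg (pvMK g (PySem.Set.add vv aw.1))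
          (PySem.Set.add vv aw.1) le_rfl aw.1 (w + aw.2) f1 f2 (by omega) (by omega)
      rw [show pvStep g ss f1 w (c, vv) aw
          = (c + (pvDfsA g ss f2 aw.1 (w + aw.2) (PySem.Set.add vv aw.1)).1,
             (pvDfsA g ss f2 aw.1 (w + aw.2) (PySem.Set.add vv aw.1)).2) from by
        simp only [pvStep, if_neg hmem]; rw [hreq],
          show pvStep g ss f2 w (c, vv) aw
          = (c + (pvDfsA g ss f2 aw.1 (w + aw.2) (PySem.Set.add vv aw.1)).1,
             (pvDfsA g ss f2 aw.1 (w + aw.2) (PySem.Set.add vv aw.1)).2) from by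
        simp only [pvStep, if_neg hmem]]
      apply ihl (fun p hp => hcl p (List.mem_cons_of_mem _ hp))
      · have hg2 : pvMK g (pvDfsA g ss f2 aw.1 (w + aw.2) (PySem.Set.add vv aw.1)).2
            ≤ pvMK g (PySem.Set.add vv aw.1) := by
          apply pvMK_anti
          intro x hx
          exact pvDfsA_grow g ss f2 aw.1 (w + aw.2) (PySem.Set.add vv aw.1) x hx
        omega
      · have hg2 : pvMK g (pvDfsA g ss f2 aw.1 (w + aw.2) (PySem.Set.add vv aw.1)).2
            ≤ pvMK g (PySem.Set.add vv aw.1) := by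
          apply pvMK_anti
          intro x hx
          exact pvDfsA_grow g ss f2 aw.1 (w + aw.2) (PySem.Set.add vv aw.1) x hx
        omega

-- A's adjacency fold IS the interpreter on the mapped worklist.
theorem pvFold_eq_runA (g : PySem.Dict Int (List (Int × Int))) (ss : Int) (fuel : Nat)
    (w : Int) :
    ∀ (l : List (Int × Int)) (v : PySem.Set Int) (c : Int),
      l.foldl (pvStep g ss fuel w) (c, v)
      = pvRunA g ss fuel (l.map (fun aw => (aw.1, w + aw.2))) v c := by
  intro l
  induction l with
  | nil => intro v c; rfl
  | cons aw l ihl =>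
    intro v c
    rw [List.foldl_cons, List.map_cons]
    by_cases hmem : aw.1 ∈ v
    · rw [show pvStep g ss fuel w (c, v) aw = (c, v) from by simp [pvStep, hmem]]
      rw [ihl v c]
      simp [pvRunA, hmem]
    · rw [show pvStep g ss fuel w (c, v) aw
          = (c + (pvDfsA g ss fuel aw.1 (w + aw.2) (PySem.Set.add v aw.1)).1,
             (pvDfsA g ss fuel aw.1 (w + aw.2) (PySem.Set.add v aw.1)).2) from by
        simp [pvStep, hmem]]
      rw [ihl]
      simp [pvRunA, hmem]

theorem pvRunA_append (g : PySem.Dict Int (List (Int × Int))) (ss : Int) (fuel : Nat) :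
    ∀ (l1 l2 : List (Int × Int)) (v : PySem.Set Int) (c : Int),
      pvRunA g ss fuel (l1 ++ l2) v c
        = pvRunA g ss fuel l2 (pvRunA g ss fuel l1 v c).2 (pvRunA g ss fuel l1 v c).1 := by
  intro l1
  induction l1 with
  | nil => intro l2 v c; rfl
  | cons nd l1 ihl =>
    intro l2 v c
    obtain ⟨n, d⟩ := nd
    by_cases hmem : n ∈ v
    · rw [List.cons_append]
      simp only [pvRunA, if_pos hmem]
      exact ihl l2 v c
    · rw [List.cons_append]
      simp only [pvRunA, if_neg hmem]
      exact ihl l2 _ _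

-- count additivity of the adjacency fold
theorem pvFold_add (g : PySem.Dict Int (List (Int × Int))) (ss : Int) (fuel : Nat)
    (w : Int) :
    ∀ (l : List (Int × Int)) (c x : Int) (vv : PySem.Set Int),
      l.foldl (pvStep g ss fuel w) (c + x, vv)
      = (c + (l.foldl (pvStep g ss fuel w) (x, vv)).1,
         (l.foldl (pvStep g ss fuel w) (x, vv)).2) := by
  intro l
  induction l with
  | nil => intro c x vv; rfl
  | cons aw l ihl =>
    intro c x vv
    rw [List.foldl_cons, List.foldl_cons]
    by_cases hmem : aw.1 ∈ vv
    · rw [show pvStep g ss fuel w (c + x, vv) aw = (c + x, vv) from by simp [pvStep, hmem],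
          show pvStep g ss fuel w (x, vv) aw = (x, vv) from by simp [pvStep, hmem]]
      exact ihl c x vv
    · rw [show pvStep g ss fuel w (c + x, vv) aw
          = (c + x + (pvDfsA g ss fuel aw.1 (w + aw.2) (PySem.Set.add vv aw.1)).1,
             (pvDfsA g ss fuel aw.1 (w + aw.2) (PySem.Set.add vv aw.1)).2) from by
        simp [pvStep, hmem],
          show pvStep g ss fuel w (x, vv) aw
          = (x + (pvDfsA g ss fuel aw.1 (w + aw.2) (PySem.Set.add vv aw.1)).1,
             (pvDfsA g ss fuel aw.1 (w + aw.2) (PySem.Set.add vv aw.1)).2) from by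
        simp [pvStep, hmem]]
      rw [add_assoc]
      exact ihl c _ _

-- Main simulation: the stack machine equals the interpreter, given enough fuel.
theorem pvStackB_eq_runA (g : PySem.Dict Int (List (Int × Int))) (ss : Int)
    (hg : pvClosed g) (stack : List (Int × Int)) (v : PySem.Set Int) (c : Int) :
    ∀ (fuel : Nat), pvMK g v + 1 ≤ fuel →
      pvStackB g ss stack v c = (pvRunA g ss fuel stack v c).1 := by
  induction stack, v, c using pvStackB.induct g ss with
  | case1 v c =>
    intro fuel _
    simp [pvStackB, pvRunA]
  | case2 v c n d rest hmem ihl =>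
    intro fuel hfuel
    rw [pvStackB, if_pos hmem]
    rw [show pvRunA g ss fuel ((n, d) :: rest) v c = pvRunA g ss fuel rest v c from by
      simp [pvRunA, hmem]]
    exact ihl fuel hfuel
  | case3 v c n d rest hmem ihl =>
    intro fuel hfuel
    simp only [dite_eq_ite] at ihl
    obtain ⟨f, rfl⟩ : ∃ f, fuel = f + 1 := ⟨fuel - 1, by omega⟩
    rw [pvStackB, if_neg hmem]
    have hrun : pvRunA g ss (f + 1) ((n, d) :: rest) v c
        = pvRunA g ss (f + 1) rest (pvDfsA g ss (f + 1) n d (PySem.Set.add v n)).2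
            (c + (pvDfsA g ss (f + 1) n d (PySem.Set.add v n)).1) := by
      simp [pvRunA, hmem]
    rw [hrun]
    by_cases hk : n ∈ g.keys
    · -- fresh key: unfold one dfs layer and split the worklist
      have hble : pvMK g (PySem.Set.add v n) + 1 ≤ f + 1 := by
        have := pvMK_add_le g v n
        omega
      rw [ihl (f + 1) hble]
      rw [pvRunA_append]
      rw [← pvFold_eq_runA g ss (f + 1) d (g.getD n []) (PySem.Set.add v n)
            (c + (if PySem.Int.mod d ss ≠ 0 then (1 : Int) else 0))]
      rw [pvFold_add]
      rw [pvDfsA_succ]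
      have hmono : (g.getD n []).foldl (pvStep g ss f d)
            ((if PySem.Int.mod d ss ≠ 0 then (1 : Int) else 0), PySem.Set.add v n)
          = (g.getD n []).foldl (pvStep g ss (f + 1) d)
            ((if PySem.Int.mod d ss ≠ 0 then (1 : Int) else 0), PySem.Set.add v n) := by
        apply pvFold_mono g ss hg d (g.getD n []) (hg n) _ _ f (f + 1)
        · have := pvMK_add_lt g v n hk hmem
          omega
        · have := pvMK_add_lt g v n hk hmem
          omega
      rw [hmono]
    · -- n is not a key: empty adjacency, nothing pushed
      have hc : g.contains n = false := by
        cases hcc : g.contains n with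
        | false => rfl
        | true => exact absurd ((PySem.Dict.contains_iff_mem_keys g n).mp hcc) hk
      have hdeg : g.getD n [] = [] := PySem.Dict.getD_of_not_contains g [] hc
      have hdfs : pvDfsA g ss (f + 1) n d (PySem.Set.add v n)
          = ((if PySem.Int.mod d ss ≠ 0 then (1 : Int) else 0), PySem.Set.add v n) := by
        rw [pvDfsA_succ, hdeg]; rfl
      rw [hdfs, hdeg]
      rw [hdeg] at ihl
      simp only [List.map_nil, List.nil_append] at ihl ⊢
      have hble : pvMK g (PySem.Set.add v n) + 1 ≤ f + 1 := by
        have := pvMK_add_le g v n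
        omega
      exact ihl (f + 1) hble

theorem pvClosed_build (edges : List (List Int)) : pvClosed (pvBuildA edges) := by
  have hstep : ∀ (g : PySem.Dict Int (List (Int × Int))) (a b w : Int), pvClosed g →
      pvClosed (pvAdjAddA (pvAdjAddA g a (b, w)) b (a, w)) := by
    intro g a b w hg
    intro n p hp
    have hka : a ∈ (pvAdjAddA (pvAdjAddA g a (b, w)) b (a, w)).keys := by
      rw [pvAdjAddA, PySem.Dict.mem_keys_insert]
      right
      rw [pvAdjAddA, PySem.Dict.mem_keys_insert]
      left; rfl
    have hkb : b ∈ (pvAdjAddA (pvAdjAddA g a (b, w)) b (a, w)).keys := by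
      rw [pvAdjAddA, PySem.Dict.mem_keys_insert]
      left; rfl
    have hold : ∀ x : Int, x ∈ g.keys → x ∈ (pvAdjAddA (pvAdjAddA g a (b, w)) b (a, w)).keys := by
      intro x hx
      rw [pvAdjAddA, PySem.Dict.mem_keys_insert]
      right
      rw [pvAdjAddA, PySem.Dict.mem_keys_insert]
      right; exact hx
    simp only [pvAdjAddA, PySem.Dict.getD_insert] at hp
    by_cases hnb : n = b
    · rw [if_pos hnb] at hp
      rcases List.mem_append.mp hp with hp1 | hp1
      · by_cases hba : b = a
        · rw [if_pos hba] at hp1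
          rcases List.mem_append.mp hp1 with hp2 | hp2
          · exact hold _ (hg _ _ hp2)
          · simp only [List.mem_singleton] at hp2
            subst hp2; exact hkb
        · rw [if_neg hba] at hp1
          exact hold _ (hg _ _ hp1)
      · simp only [List.mem_singleton] at hp1
        subst hp1; exact hka
    · rw [if_neg hnb] at hp
      by_cases hna : n = a
      · rw [if_pos hna] at hp
        rcases List.mem_append.mp hp with hp1 | hp1
        · exact hold _ (hg _ _ hp1)
        · simp only [List.mem_singleton] at hp1
          subst hp1; exact hkb
      · rw [if_neg hna] at hp
        exact hold _ (hg _ _ hp)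
  have hfold : ∀ (es : List (List Int)) (g0 : PySem.Dict Int (List (Int × Int))),
      pvClosed g0 →
      pvClosed (es.foldl (fun g e =>
        match e with
        | [a, b, w] => pvAdjAddA (pvAdjAddA g a (b, w)) b (a, w)
        | _ => g) g0) := by
    intro es
    induction es with
    | nil => intro g0 h; exact h
    | cons e es ih =>
      intro g0 h
      rw [List.foldl_cons]
      apply ih
      match e with
      | [] => exact h
      | [_] => exact h
      | [_, _] => exact h
      | [a, b, w] => exact hstep g0 a b w h
      | _ :: _ :: _ :: _ :: _ => exact h
  apply hfold
  intro n p hp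
  rw [PySem.Dict.getD_empty] at hp
  exact absurd hp (List.not_mem_nil)

theorem pvKeysLen_build (edges : List (List Int)) :
    (pvBuildA edges).keys.length ≤ 2 * edges.length := by
  have hins : ∀ (g : PySem.Dict Int (List (Int × Int))) (k : Int) (xs : List (Int × Int)),
      (g.insert k xs).keys.length ≤ g.keys.length + 1 := by
    intro g k xs
    cases hc : g.contains k with
    | true => rw [PySem.Dict.keys_insert_of_contains g xs hc]; omega
    | false => rw [PySem.Dict.keys_insert_of_not_contains g xs hc]; simp
  have hfold : ∀ (es : List (List Int)) (g0 : PySem.Dict Int (List (Int × Int))),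
      (es.foldl (fun g e =>
        match e with
        | [a, b, w] => pvAdjAddA (pvAdjAddA g a (b, w)) b (a, w)
        | _ => g) g0).keys.length ≤ g0.keys.length + 2 * es.length := by
    intro es
    induction es with
    | nil => intro g0; simp
    | cons e es ih =>
      intro g0
      rw [List.foldl_cons]
      have hstep : (match e with
          | [a, b, w] => pvAdjAddA (pvAdjAddA g0 a (b, w)) b (a, w)
          | _ => g0).keys.length ≤ g0.keys.length + 2 := by
        match e with
        | [] => exact Nat.le_add_right _ _
        | [_] => exact Nat.le_add_right _ _
        | [_, _] => exact Nat.le_add_right _ _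
        | [a, b, w] =>
          calc (pvAdjAddA (pvAdjAddA g0 a (b, w)) b (a, w)).keys.length
              ≤ (pvAdjAddA g0 a (b, w)).keys.length + 1 := hins _ _ _
            _ ≤ g0.keys.length + 2 := by have := hins g0 a ((g0.getD a []) ++ [(b, w)]); simp only [pvAdjAddA]; omega
        | _ :: _ :: _ :: _ :: _ => exact Nat.le_add_right _ _
      calc _ ≤ (match e with
          | [a, b, w] => pvAdjAddA (pvAdjAddA g0 a (b, w)) b (a, w)
          | _ => g0).keys.length + 2 * es.length := ih _
        _ ≤ g0.keys.length + 2 * (e :: es).length := by simp only [List.length_cons]; omega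
  have := hfold edges PySem.Dict.empty
  simpa [PySem.Dict.keys_empty] using this

-- the pairing loop of A, in recursive form
def pvG : Int → List Int → Int
  | _, [] => 0
  | S, c :: cs => c * (S - c) + pvG (S - c) cs

theorem pvFold_pair : ∀ (l : List Int) (S t : Int),
    l.foldl (fun st c => (st.1 - c, st.2 + c * (st.1 - c))) (S, t)
      = (S - l.sum, t + pvG S l) := by
  intro l
  induction l with
  | nil => intro S t; simp [pvG]
  | cons c cs ih =>
    intro S t
    rw [List.foldl_cons, ih]
    simp only [pvG, List.sum_cons]
    rw [Prod.mk.injEq]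
    constructor <;> ring

theorem pvG_closed : ∀ (l : List Int) (S : Int),
    2 * pvG S l = 2 * S * l.sum - l.sum * l.sum - (l.map (fun c => c * c)).sum := by
  intro l
  induction l with
  | nil => intro S; simp [pvG]
  | cons c cs ih =>
    intro S
    simp only [pvG, List.sum_cons, List.map_cons]
    rw [mul_add, ih (S - c)]
    ring

-- the pairing loop of A equals the closed form
theorem pvPairClosed (l : List Int) :
    (l.foldl (fun st c => (st.1 - c, st.2 + c * (st.1 - c))) (l.sum, (0 : Int))).2
      = PySem.Int.floordiv (l.sum * l.sum - (l.map (fun c => c * c)).sum) 2 := by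
  rw [pvFold_pair]
  have h2 : l.sum * l.sum - (l.map (fun c => c * c)).sum = 2 * pvG l.sum l := by
    rw [pvG_closed l l.sum]; ring
  rw [h2, PySem.Int.floordiv_eq_ediv_of_pos (by norm_num)]
  simp [zero_add]

-- per-branch equality: A's dfs count equals B's stack machine
theorem pvBranch_eq (edges : List (List Int)) (ss : Int) (center : Int) (aw : Int × Int) :
    (pvDfsA (pvBuildA edges) ss (2 * edges.length + 2) aw.1 aw.2
        (PySem.Set.ofList [aw.1, center])).1
      = pvStackB (pvBuildA edges) ss
          (((pvBuildA edges).getD aw.1 []).map (fun bw => (bw.1, aw.2 + bw.2)))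
          (PySem.Set.ofList [aw.1, center])
          (if PySem.Int.mod aw.2 ss ≠ 0 then 1 else 0) := by
  set g := pvBuildA edges with hgdef
  have hg : pvClosed g := pvClosed_build edges
  have hkl : g.keys.length ≤ 2 * edges.length := pvKeysLen_build edges
  have hmk : pvMK g (PySem.Set.ofList [aw.1, center]) + 1 ≤ 2 * edges.length + 1 := by
    have := pvMK_le_keys g (PySem.Set.ofList [aw.1, center])
    omega
  rw [pvStackB_eq_runA g ss hg _ _ _ (2 * edges.length + 1) hmk]
  rw [show (2 : Nat) * edges.length + 2 = (2 * edges.length + 1) + 1 from rfl]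
  rw [pvDfsA_succ]
  rw [pvFold_eq_runA g ss (2 * edges.length + 1) aw.2 (g.getD aw.1 [])
        (PySem.Set.ofList [aw.1, center]) (if PySem.Int.mod aw.2 ss ≠ 0 then (1 : Int) else 0)]

-- ===== VERDICT (by name: the statement is the Claim_ definition above) =====
theorem countPairsOfConnectableServers_spec : Claim_equal_countPairsOfConnectableServers := by
  intro edges ss _ _
  unfold Spec_countPairsOfConnectableServers
  unfold countPairsOfConnectableServers countPairsOfConnectableServers_alt
  apply congrFun
  apply congrFun
  apply congrArg
  funext result center
  by_cases hlen : 1 < ((pvBuildA edges).getD center []).length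
  · rw [if_pos hlen, if_neg (by omega)]
    rw [PySem.List.foldl_append_singleton_eq_map, PySem.List.foldl_append_singleton_eq_map]
    simp only [List.nil_append]
    have hmaps : ((pvBuildA edges).getD center []).map
          (fun aw => (pvDfsA (pvBuildA edges) ss (2 * edges.length + 2) aw.1 aw.2
            (PySem.Set.ofList [aw.1, center])).1)
        = ((pvBuildA edges).getD center []).map
          (fun aw => pvStackB (pvBuildA edges) ss
            (((pvBuildA edges).getD aw.1 []).map (fun bw => (bw.1, aw.2 + bw.2)))
            (PySem.Set.ofList [aw.1, center])
            (if PySem.Int.mod aw.2 ss ≠ 0 then 1 else 0)) := by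
      apply List.map_congr_left
      intro aw _
      exact pvBranch_eq edges ss center aw
    rw [hmaps]
    rw [pvPairClosed]
  · rw [if_neg hlen, if_pos (by omega)]
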